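-- pv_equiv track=rewrite | github.com/MohamedAdghir/Chosse_you_story | M03/Proyecto/Funciones_grupal.py | getFormatedBodyColumns
-- ===== SOURCE A (Python) =====
-- def formatText(text, lenLine, split):
--     formatedText = ""
--     start = 0
--     end = 0
--
--     while end < len(text):
--         if text[end] == " ":
--             start = end + 1
--             end += lenLine + 1
--         else:
--             start = end
--             end += lenLine
--
--         if end >= len(text):
--             slicedText = text[start:]
--             formatedText += slicedText + "\n"
--         else:
--             if text[end] != " ":
--                 space = text[start:end].rfind(" ")
--                 if space != -1:
--                     end = start + space
--
--             slicedText = text[start:end]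
--             formatedText += slicedText + split
--
--     return formatedText
--
-- def getFormatedBodyColumns(texts,lenLines,margin=2):
--     formatedColumns = []
--     finalText = ""
--     for i in range(len(texts)):
--         formatedColumns.append([])
--         formatedText = formatText(texts[i],lenLines[i],"\n")
--         start = 0
--         end = 0
--         for j in range(formatedText.count("\n")):
--             end = formatedText.find("\n", start)
--             formatedColumns[i].append(formatedText[start:end])
--             start = end + 1
--
--     maxLine = 0
--     for text in formatedColumns:
--         if len(text) > maxLine:
--             maxLine = len(text)
--
--     for i in range(len(formatedColumns)):
--         while len(formatedColumns[i]) != maxLine: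
--             formatedColumns[i].append("")
--
--     for i in range(maxLine):
--         for j in range(len(formatedColumns)):
--             finalText += formatedColumns[j][i].ljust(lenLines[j]," ")
--             if j != len(formatedColumns)-1:
--                 finalText += "".ljust(margin," ")
--         finalText += "\n"
--
--     return finalText
-- ===== SOURCE B (Python) =====
-- def formatText(text, lenLine, split):
--     formatedText = ""
--     start = 0
--     end = 0
--
--     while end < len(text):
--         if text[end] == " ":
--             start = end + 1
--             end += lenLine + 1
--         else:
--             start = end
--             end += lenLine
--
--         if end >= len(text):
--             slicedText = text[start:]
--             formatedText += slicedText + "\n"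
--         else:
--             if text[end] != " ":
--                 space = text[start:end].rfind(" ")
--                 if space != -1:
--                     end = start + space
--
--             slicedText = text[start:end]
--             formatedText += slicedText + split
--
--     return formatedText
--
-- def getFormatedBodyColumns(texts, lenLines, margin=2):
--     # single left-to-right merge: each column is folded into the row strings
--     # as it is wrapped; no max-line computation, no padding pass, no transpose.
--     n = len(texts)
--     rows = []   # the output rows built so far (without the trailing newline)
--     blank = ""  # what a row consisting only of already-processed columns looks like
--     for j in range(n):
--         lines = formatText(texts[j], lenLines[j], "\n").split("\n")[:-1]
--         rows.extend(blank for _ in range(len(lines) - len(rows)))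
--         sep = " " * margin if j != n - 1 else ""
--         rows = [r + (lines[i] if i < len(lines) else "").ljust(lenLines[j]) + sep
--                 for i, r in enumerate(rows)]
--         blank += "".ljust(lenLines[j]) + sep
--     return "".join(r + "\n" for r in rows)
-- ===== Notes on version B (the rewrite author's own statement) =====
-- stated objective: alternative
-- what changed: getFormatedBodyColumns is rebuilt as a single left-to-right merge over columns: each wrapped column is folded directly into the growing row strings (new rows start from an incrementally maintained all-blank prefix), so A's max-line computation, the explicit padding-with-'' passes and the row/column double-indexed transpose loop all disappear (formatText is kept unchanged).
import Mathlib
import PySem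

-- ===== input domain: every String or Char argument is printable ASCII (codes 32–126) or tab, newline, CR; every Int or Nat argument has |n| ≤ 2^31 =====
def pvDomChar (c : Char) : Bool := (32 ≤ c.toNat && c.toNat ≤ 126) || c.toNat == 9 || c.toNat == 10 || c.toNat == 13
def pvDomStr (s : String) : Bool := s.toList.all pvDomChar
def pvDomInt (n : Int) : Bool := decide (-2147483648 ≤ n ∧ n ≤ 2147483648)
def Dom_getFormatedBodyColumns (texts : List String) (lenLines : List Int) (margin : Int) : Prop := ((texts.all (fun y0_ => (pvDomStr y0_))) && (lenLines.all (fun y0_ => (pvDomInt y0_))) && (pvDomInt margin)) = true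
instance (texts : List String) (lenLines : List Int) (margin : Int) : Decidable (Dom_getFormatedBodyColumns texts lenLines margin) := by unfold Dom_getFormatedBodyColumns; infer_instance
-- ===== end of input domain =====

-- B merges each wrapped column left-to-right into the growing row strings (new rows start from a maintained blank prefix) instead of A's maxLine/padding/transpose passes; objective: alternative decomposition, same cost. formatText is shared unchanged.

-- ===== PORT A =====

-- hand port of str.ljust(w, " "): exact (pad on the right with spaces up to width w; w ≤ len gives s back)
def ljustP (cs : List Char) (w : Int) : List Char :=
  cs ++ List.replicate (w - cs.length).toNat ' '

-- the while-loop of formatText, with fuel (the Python loop terminates in ≤ 2*len+2 iterations when lenLine ≥ 1; Pre_ guarantees that)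
def ftLoop (text : List Char) (lenLine : Int) (split : List Char) :
    Nat → Int → Int → List Char → List Char
  | 0, _, _, acc => acc
  | fuel+1, _start0, end0, acc =>
    if end0 < (text.length : Int) then
      let p := if PySem.List.pyGet? text end0 = some ' ' then (end0 + 1, end0 + lenLine + 1)
               else (end0, end0 + lenLine)
      if (text.length : Int) ≤ p.2 then
        acc ++ PySem.List.slice text (some p.1) none ++ ['\n']
      else
        let e :=
          if PySem.List.pyGet? text p.2 ≠ some ' ' then
            let space := PySem.Chars.rfind (PySem.List.slice text (some p.1) (some p.2)) [' ']
            if space ≠ -1 then p.1 + space else p.2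
          else p.2
        ftLoop text lenLine split fuel p.1 e
          (acc ++ PySem.List.slice text (some p.1) (some e) ++ split)
    else acc

def formatTextP (text : List Char) (lenLine : Int) (split : List Char) : List Char :=
  ftLoop text lenLine split (2 * text.length + 4) 0 0 []

-- the 'while len(formatedColumns[i]) != maxLine: append("")' loop, with fuel (exactly enough
-- iterations when len ≤ m, which always holds at the call site; Python diverges when m < len, unreachable here)
def padLoop (m : Int) : Nat → List (List Char) → List (List Char)
  | 0, c => c
  | fuel+1, c => if (c.length : Int) ≠ m then padLoop m fuel (c ++ [([] : List Char)]) else c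

def padWhile (c : List (List Char)) (m : Int) : List (List Char) :=
  padLoop m (m - c.length).toNat c

def getFormatedBodyColumns (texts : List String) (lenLines : List Int) (margin : Int) : String :=
  let formatedColumns : List (List (List Char)) :=
    (List.range texts.length).foldl (fun cols i =>
      let ft := formatTextP (PySem.List.pyGetD texts (i : Int) "").toList
                  (PySem.List.pyGetD lenLines (i : Int) 0) ['\n']
      let col := ((List.range (PySem.Chars.count ft ['\n'])).foldl
          (fun (st : List (List Char) × Int) _ =>
            let e := PySem.Chars.findFrom ft ['\n'] st.2 none
            (st.1 ++ [PySem.List.slice ft (some st.2) (some e)], e + 1)) ([], 0)).1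
      cols ++ [col]) []
  let maxLine : Int := formatedColumns.foldl
      (fun m c => if (c.length : Int) > m then (c.length : Int) else m) 0
  let padded := formatedColumns.map (fun c => padWhile c maxLine)
  let finalText := (PySem.List.pyRange 0 maxLine 1).foldl (fun acc i =>
      ((PySem.List.pyRange 0 (padded.length : Int) 1).foldl (fun acc2 j =>
        let acc3 := acc2 ++ ljustP (PySem.List.pyGetD (PySem.List.pyGetD padded j []) i [])
                              (PySem.List.pyGetD lenLines j 0)
        if j ≠ (padded.length : Int) - 1 then acc3 ++ ljustP [] margin else acc3) acc)
      ++ ['\n']) []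
  String.ofList finalText

-- ===== PORT B =====
-- Source B's single merge loop over columns: state = (rows built so far, blank prefix).
-- texts[j] / lenLines[j] are ported with getD: j ranges over List.range texts.length, so both
-- indices are in range under Pre_ and getD is exact there.
def getFormatedBodyColumns_alt (texts : List String) (lenLines : List Int) (margin : Int) : String :=
  let n := texts.length
  let st := (List.range n).foldl (fun (st : List (List Char) × List Char) j =>
    let lines := ((PySem.Chars.split? (formatTextP (texts.getD j "").toList (lenLines.getD j 0) ['\n'])
                    ['\n']).getD []).dropLast
    let rows0 := st.1 ++ List.replicate (lines.length - st.1.length) st.2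
    let sep := if j ≠ n - 1 then PySem.List.pyRepeat [' '] margin else []
    let rows := (PySem.List.enumerate rows0 0).map (fun p =>
      p.2 ++ ljustP (if p.1 < (lines.length : Int) then PySem.List.pyGetD lines p.1 [] else [])
               (lenLines.getD j 0) ++ sep)
    (rows, st.2 ++ ljustP [] (lenLines.getD j 0) ++ sep)) ([], [])
  String.ofList (PySem.Chars.join [] (st.1.map (· ++ ['\n'])))

-- ===== PRECONDITION & SPEC =====
-- Pre_ excludes exactly the inputs where Python A does not return: lenLines shorter than texts (IndexError),
-- and a width < 1 paired with a text the wrapping loop cannot finish (every nonempty text for a negative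
-- width, every text with a non-space character for width 0): there A loops forever or runs off the string.
def Pre_getFormatedBodyColumns (texts : List String) (lenLines : List Int) (margin : Int) : Prop :=
  texts.length ≤ lenLines.length ∧
    ∀ p ∈ texts.zip lenLines, p.1 = "" ∨ 1 ≤ p.2 ∨ (p.2 = 0 ∧ p.1.toList.all (fun c => c = ' ') = true)
instance (texts : List String) (lenLines : List Int) (margin : Int) : Decidable (Pre_getFormatedBodyColumns texts lenLines margin) := by unfold Pre_getFormatedBodyColumns; infer_instance

def pvWitness_getFormatedBodyColumns : List String × List Int × Int :=
  (["hello wide world", "ab cd"], [6, 4], 2)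

def Spec_getFormatedBodyColumns (texts : List String) (lenLines : List Int) (margin : Int) (out : String) : Prop := out = getFormatedBodyColumns_alt texts lenLines margin
instance (texts : List String) (lenLines : List Int) (margin : Int) (out : String) : Decidable (Spec_getFormatedBodyColumns texts lenLines margin out) := by unfold Spec_getFormatedBodyColumns; infer_instance

-- ===== CLAIM (what is proved, stated in full; the proofs are below) =====
def Claim_equal_getFormatedBodyColumns : Prop := ∀ (texts : List String) (lenLines : List Int) (margin : Int), Dom_getFormatedBodyColumns texts lenLines margin → Pre_getFormatedBodyColumns texts lenLines margin → Spec_getFormatedBodyColumns texts lenLines margin (getFormatedBodyColumns texts lenLines margin)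

-- ===== LEMMAS AND PROOFS =====

def splitNl : List Char → List Char → List (List Char)
  | [], cur => [cur.reverse]
  | c :: rest, cur =>
    if c = '\n' then cur.reverse :: splitNl rest []
    else splitNl rest (c :: cur)

theorem splitOn_go_eq (l : List Char) : ∀ (fuel : Nat) (cur : List Char) (acc : List (List Char)),
    l.length < fuel →
    PySem.Chars.splitOn.go ['\n'] fuel l cur acc = acc.reverse ++ splitNl l cur := by
  induction l with
  | nil =>
    intro fuel cur acc h
    match fuel, h with
    | fuel+1, _ =>
      rw [PySem.Chars.splitOn.go.eq_def]
      simp [splitNl]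
  | cons c rest ih =>
    intro fuel cur acc h
    match fuel, h with
    | fuel+1, h =>
      rw [PySem.Chars.splitOn.go.eq_def]
      simp only [List.length_cons, Nat.add_lt_add_iff_right] at h
      by_cases hc : c = '\n'
      · subst hc
        have hp : List.isPrefixOf ['\n'] ('\n' :: rest) = true := by simp [List.isPrefixOf]
        simp only [hp, if_true, List.length_cons, List.length_nil, List.drop_succ_cons, List.drop_zero]
        rw [ih fuel [] (cur.reverse :: acc) (by simp at h; omega)]
        simp [splitNl]
      · have hp : List.isPrefixOf ['\n'] (c :: rest) = false := by simp [List.isPrefixOf]; exact fun h' => hc h'.symm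
        simp only [hp, Bool.false_eq_true, if_false]
        rw [ih fuel (c :: cur) acc (by omega)]
        simp [splitNl, hc]

theorem splitOn_eq (s : List Char) : PySem.Chars.splitOn s ['\n'] = splitNl s [] := by
  rw [PySem.Chars.splitOn, splitOn_go_eq s (s.length + 1) [] [] (by omega)]
  simp

theorem count_go_eq (l : List Char) : ∀ (fuel : Nat) (acc : Nat), l.length ≤ fuel →
    PySem.Chars.count.go ['\n'] fuel l acc = acc + l.count '\n' := by
  induction l with
  | nil =>
    intro fuel acc h
    rw [PySem.Chars.count.go.eq_def]
    cases fuel <;> simp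
  | cons c rest ih =>
    intro fuel acc h
    match fuel, h with
    | fuel+1, h =>
      rw [PySem.Chars.count.go.eq_def]
      simp only [List.length_cons, Nat.add_le_add_iff_right] at h
      by_cases hc : c = '\n'
      · subst hc
        have hp : List.isPrefixOf ['\n'] ('\n' :: rest) = true := by simp [List.isPrefixOf]
        simp only [hp, if_true, List.length_cons, List.length_nil, List.drop_succ_cons, List.drop_zero]
        rw [ih fuel (acc+1) (by simp at h; omega)]
        simp [List.count_cons]
        omega
      · have hp : List.isPrefixOf ['\n'] (c :: rest) = false := by simp [List.isPrefixOf]; exact fun h' => hc h'.symm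
        simp only [hp, Bool.false_eq_true, if_false]
        rw [ih fuel acc (by omega)]
        simp [List.count_cons, hc]

theorem count_eq_count (s : List Char) : PySem.Chars.count s ['\n'] = s.count '\n' := by
  rw [PySem.Chars.count]
  simp only [List.isEmpty_cons, Bool.false_eq_true, if_false]
  rw [count_go_eq s s.length 0 (le_refl _)]
  omega

theorem find_go_eq (l : List Char) : ∀ (k : Nat),
    PySem.Chars.find.go ['\n'] l k =
      if '\n' ∈ l then ((k + l.idxOf '\n' : Nat) : Int) else -1 := by
  induction l with
  | nil => intro k; rw [PySem.Chars.find.go.eq_def]; simp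
  | cons c rest ih =>
    intro k
    rw [PySem.Chars.find.go.eq_def]
    by_cases hc : c = '\n'
    · subst hc
      have hp : List.isPrefixOf ['\n'] ('\n' :: rest) = true := by simp [List.isPrefixOf]
      simp [hp, List.idxOf_cons]
    · have hp : List.isPrefixOf ['\n'] (c :: rest) = false := by simp [List.isPrefixOf]; exact fun h' => hc h'.symm
      simp only [hp, Bool.false_eq_true, if_false]
      rw [ih (k+1)]
      by_cases hm : '\n' ∈ rest
      · simp [hm, hc, List.idxOf_cons, Ne.symm hc]
        push_cast
        omega
      · simp [hm, hc, Ne.symm hc]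

theorem find_eq (l : List Char) :
    PySem.Chars.find l ['\n'] = if '\n' ∈ l then ((l.idxOf '\n' : Nat) : Int) else -1 := by
  rw [PySem.Chars.find, find_go_eq l 0]
  simp

theorem splitNl_no_nl (l : List Char) : ∀ (cur : List Char), '\n' ∉ l →
    splitNl l cur = [cur.reverse ++ l] := by
  induction l with
  | nil => intro cur h; simp [splitNl]
  | cons c rest ih =>
    intro cur h
    simp only [List.mem_cons, not_or] at h
    simp only [splitNl, if_neg (Ne.symm h.1)]
    rw [ih (c :: cur) h.2]
    simp

theorem splitNl_first (a : List Char) : ∀ (b cur : List Char), '\n' ∉ a →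
    splitNl (a ++ '\n' :: b) cur = (cur.reverse ++ a) :: splitNl b [] := by
  induction a with
  | nil => intro b cur h; simp [splitNl]
  | cons c rest ih =>
    intro b cur h
    simp only [List.mem_cons, not_or] at h
    simp only [List.cons_append, splitNl, if_neg (Ne.symm h.1)]
    rw [ih b (c :: cur) h.2]
    simp

theorem splitNl_ne_nil' (l : List Char) : ∀ cur, splitNl l cur ≠ [] := by
  induction l with
  | nil => intro cur; simp [splitNl]
  | cons c rest ih => intro cur; simp only [splitNl]; split <;> simp [ih]

theorem idxOf_decomp (v : Char) (l : List Char) (h : v ∈ l) :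
    v ∉ l.take (l.idxOf v) ∧ l = l.take (l.idxOf v) ++ v :: l.drop (l.idxOf v + 1) := by
  induction l with
  | nil => simp at h
  | cons c rest ih =>
    by_cases hc : c = v
    · subst hc; simp [List.idxOf_cons]
    · have hv : v ∈ rest := by simp [Ne.symm hc] at h; exact h
      have hcv : (c == v) = false := by simp [hc]
      obtain ⟨h1, h2⟩ := ih hv
      simp only [List.idxOf_cons, hcv, cond_false, List.take_succ_cons, List.cons_append,
        List.drop_succ_cons, List.mem_cons, not_or]
      exact ⟨⟨fun e => hc e.symm, h1⟩, congrArg (c :: ·) h2⟩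

theorem loopA_eq (ft : List Char) : ∀ (rest : List Char) (st0 : Nat) (acc : List (List Char)),
    ft.drop st0 = rest → st0 ≤ ft.length →
    ((List.range (rest.count '\n')).foldl
      (fun (st : List (List Char) × Int) _ =>
        let e := PySem.Chars.findFrom ft ['\n'] st.2 none
        (st.1 ++ [PySem.List.slice ft (some st.2) (some e)], e + 1)) (acc, (st0 : Int))).1
    = acc ++ (splitNl rest []).dropLast := by
  suffices H : ∀ (n : Nat) (rest : List Char) (st0 : Nat) (acc : List (List Char)),
      rest.length ≤ n → ft.drop st0 = rest → st0 ≤ ft.length →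
      ((List.range (rest.count '\n')).foldl
        (fun (st : List (List Char) × Int) _ =>
          let e := PySem.Chars.findFrom ft ['\n'] st.2 none
          (st.1 ++ [PySem.List.slice ft (some st.2) (some e)], e + 1)) (acc, (st0 : Int))).1
      = acc ++ (splitNl rest []).dropLast by
    exact fun rest st0 acc h1 h2 => H rest.length rest st0 acc le_rfl h1 h2
  intro n
  induction n with
  | zero =>
    intro rest st0 acc hn hdrop hle
    have : rest = [] := List.eq_nil_of_length_eq_zero (Nat.le_zero.mp hn)
    subst this
    simp [splitNl]
  | succ n IH =>
    intro rest st0 acc hn hdrop hle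
    by_cases hm : '\n' ∈ rest
    · obtain ⟨hna, hdecomp⟩ := idxOf_decomp '\n' rest hm
      set idx := rest.idxOf '\n' with hi
      set a := rest.take idx with ha
      set b := rest.drop (idx + 1) with hb
      have hidx : idx < rest.length := List.idxOf_lt_length_of_mem hm
      have hcount : rest.count '\n' = (b.count '\n') + 1 := by
        rw [hdecomp]
        simp [List.count_append, List.count_cons, List.count_eq_zero.mpr hna]
      have hlenrest : rest.length = ft.length - st0 := by
        rw [← hdrop]; simp
      have hfind : PySem.Chars.find rest ['\n'] = ((idx : Nat) : Int) := by
        rw [find_eq]; simp [hm]; exact hi.symm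
      have hff : PySem.Chars.findFrom ft ['\n'] (st0 : Int) none
          = ((st0 + idx : Nat) : Int) := by
        rw [PySem.Chars.findFrom_natCast ft ['\n'] st0 hle, hdrop, hfind]
        rw [if_neg (by omega)]
        push_cast; ring
      have hslice : PySem.List.slice ft (some (st0 : Int)) (some ((st0 + idx : Nat) : Int)) = a := by
        rw [PySem.List.slice_natCast]
        have h2 : st0 + idx - st0 = idx := by omega
        rw [h2, hdrop, ha]
      have hdropb : ft.drop (st0 + idx + 1) = b := by
        rw [hb, ← hdrop, List.drop_drop]
        congr 1
      have hleb : st0 + idx + 1 ≤ ft.length := by omega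
      have hlenb : b.length ≤ n := by
        have : b.length = rest.length - (idx + 1) := by rw [hb]; simp
        omega
      rw [hcount, List.range_succ_eq_map, List.foldl_cons, List.foldl_map]
      simp only [hff, hslice]
      have hcast : ((st0 + idx : Nat) : Int) + 1 = ((st0 + idx + 1 : Nat) : Int) := by
        push_cast; ring
      rw [hcast]
      rw [IH b (st0 + idx + 1) (acc ++ [a]) hlenb hdropb hleb]
      rw [hdecomp, splitNl_first a b [] hna]
      rw [List.dropLast_cons_of_ne_nil (splitNl_ne_nil' b [])]
      simp
    · have hc0 : rest.count '\n' = 0 := List.count_eq_zero.mpr hm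
      rw [hc0]
      simp [splitNl_no_nl rest [] hm]

theorem colA_eq (ft : List Char) :
    ((List.range (PySem.Chars.count ft ['\n'])).foldl
      (fun (st : List (List Char) × Int) _ =>
        let e := PySem.Chars.findFrom ft ['\n'] st.2 none
        (st.1 ++ [PySem.List.slice ft (some st.2) (some e)], e + 1)) ([], 0)).1
    = ((PySem.Chars.split? ft ['\n']).getD []).dropLast := by
  have h0 := loopA_eq ft ft 0 [] (by simp) (by simp)
  rw [count_eq_count]
  simp only [Nat.cast_zero] at h0
  rw [h0]
  simp [PySem.Chars.split?, splitOn_eq]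

theorem maxLine_eq (cols : List (List (List Char))) : ∀ (m : Nat),
    cols.foldl (fun (m : Int) c => if (c.length : Int) > m then (c.length : Int) else m) (m : Int)
    = ((cols.map (fun c => c.length)).foldl max m : Nat) := by
  induction cols with
  | nil => intro m; simp
  | cons c t ih =>
    intro m
    simp only [List.foldl_cons, List.map_cons]
    by_cases h : m < c.length
    · have hmax : max m c.length = c.length := by omega
      rw [if_pos (by exact_mod_cast h), ih c.length, hmax]
    · have hmax : max m c.length = m := by omega
      rw [if_neg (by push_cast; omega), ih m, hmax]

theorem padLoop_eq : ∀ (k : Nat) (c : List (List Char)),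
    padLoop ((c.length + k : Nat) : Int) k c = c ++ List.replicate k [] := by
  intro k
  induction k with
  | zero => intro c; simp [padLoop]
  | succ k ih =>
    intro c
    show (if ((c.length : Int) ≠ ((c.length + (k+1) : Nat) : Int)) then
        padLoop ((c.length + (k+1) : Nat) : Int) k (c ++ [([] : List Char)]) else c)
      = c ++ List.replicate (k+1) []
    rw [if_pos (by push_cast; omega)]
    have h1 : ((c.length + (k+1) : Nat) : Int) = (((c ++ [([] : List Char)]).length + k : Nat) : Int) := by
      simp; push_cast; ring
    rw [h1, ih (c ++ [([] : List Char)])]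
    simp [List.replicate_succ]

theorem padWhile_eq (c : List (List Char)) (k : Nat) :
    padWhile c ((c.length + k : Nat) : Int) = c ++ List.replicate k [] := by
  unfold padWhile
  have h1 : (((c.length + k : Nat) : Int) - (c.length : Int)).toNat = k := by push_cast; omega
  rw [h1]
  exact padLoop_eq k c

theorem foldl_max_all_zero : ∀ (l : List Nat), (∀ x ∈ l, x = 0) → l.foldl max 0 = 0 := by
  intro l
  induction l with
  | nil => intro _; rfl
  | cons x t ih =>
    intro h
    simp only [List.foldl_cons, h x (by simp)]
    exact ih fun y hy => h y (by simp [hy])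

theorem foldl_max_init : ∀ (l : List Nat) (a b : Nat),
    l.foldl max (max a b) = max a (l.foldl max b) := by
  intro l
  induction l with
  | nil => intro a b; rfl
  | cons x t ih =>
    intro a b
    simp only [List.foldl_cons, Nat.max_assoc]
    exact ih a (max b x)

theorem foldl_max_tail (cols : List (List (List Char))) : ∀ (m : Nat),
    ((cols.map List.tail).map (fun c => c.length)).foldl max (m - 1)
    = ((cols.map (fun c => c.length)).foldl max m) - 1 := by
  induction cols with
  | nil => intro m; simp
  | cons a t ih =>
    intro m
    simp only [List.map_cons, List.foldl_cons]
    rw [show max (m-1) a.tail.length = max m a.length - 1 by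
      cases a with
      | nil => simp
      | cons x xs => simp; omega]
    exact ih (max m a.length)

theorem getD_tail (c : List (List Char)) (i : Nat) :
    c.tail.getD i [] = c.getD (i+1) [] := by
  cases c <;> simp

theorem pvSumTailLe {α : Type} (cols : List (List α)) :
    ((cols.map List.tail).map List.length).sum ≤ (cols.map List.length).sum := by
  induction cols with
  | nil => simp
  | cons a t ih =>
    simp only [List.map_cons, List.sum_cons]
    have : a.tail.length ≤ a.length := by cases a <;> simp
    omega

theorem pvSumTailLt {α : Type} (cols : List (List α))
    (h : cols.any (fun c => !c.isEmpty) = true) :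
    ((cols.map List.tail).map List.length).sum < (cols.map List.length).sum := by
  induction cols with
  | nil => simp at h
  | cons a t ih =>
    simp only [List.any_cons, Bool.or_eq_true] at h
    simp only [List.map_cons, List.sum_cons]
    rcases h with h | h
    · have ha : a ≠ [] := by cases a <;> simp_all
      have : a.tail.length < a.length := by cases a with | nil => simp at ha | cons x xs => simp
      have := pvSumTailLe t
      omega
    · have : a.tail.length ≤ a.length := by cases a <;> simp
      have := ih h
      omega

-- itertools-style transposition, used only as a proof-side description of A's row loop
def zipLongestRows (cols : List (List (List Char))) : List (List (List Char)) :=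
  if h : cols.any (fun c => !c.isEmpty) then
    (cols.map (fun c => c.headD [])) :: zipLongestRows (cols.map List.tail)
  else []
  termination_by (cols.map List.length).sum
  decreasing_by simpa using pvSumTailLt cols h

theorem zipLongestRows_eq : ∀ (N : Nat) (cols : List (List (List Char))),
    (cols.map (fun c => c.length)).foldl max 0 = N →
    zipLongestRows cols = (List.range N).map (fun i => cols.map (fun c => c.getD i [])) := by
  intro N
  induction N with
  | zero =>
    intro cols h
    have hall : ∀ c ∈ cols, c = [] := by
      intro c hc
      have := ((PySem.List.le_foldl_max_nat (cols.map (fun c => c.length)) id 0).2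
        c.length (by simp; exact ⟨c, hc, rfl⟩))
      simp only [id] at this
      rw [h] at this
      exact List.eq_nil_of_length_eq_zero (Nat.le_zero.mp this)
    rw [zipLongestRows]
    rw [dif_neg (by simp; intro c hc; simp [hall c hc])]
    simp
  | succ N ih =>
    intro cols h
    have hne : cols.any (fun c => !c.isEmpty) = true := by
      by_contra hno
      have hall : ∀ c ∈ cols, c = [] := by
        intro c hc
        simp only [List.any_eq_true, Bool.not_eq_eq_eq_not, Bool.not_true] at hno
        push_neg at hno
        have := hno c hc
        simpa [List.isEmpty_iff] using this
      have : (cols.map (fun c => c.length)).foldl max 0 = 0 := by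
        apply foldl_max_all_zero
        intro x hx
        simp only [List.mem_map] at hx
        obtain ⟨c, hc, rfl⟩ := hx
        rw [hall c hc]
        rfl
      omega
    rw [zipLongestRows, dif_pos hne]
    have htail : ((cols.map List.tail).map (fun c => c.length)).foldl max 0 = N := by
      have h1 := foldl_max_tail cols 1
      rw [show (1:Nat) - 1 = 0 from rfl] at h1
      rw [h1]
      rw [show (1:Nat) = max 1 0 from rfl, foldl_max_init]
      rw [h]
      omega
    rw [ih (cols.map List.tail) htail]
    rw [List.range_succ_eq_map]
    simp only [List.map_cons, List.map_map]
    congr 1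
    · apply List.map_congr_left
      intro c _
      cases c <;> simp
    · apply List.map_congr_left
      intro i _
      simp only [Function.comp_apply]
      apply List.map_congr_left
      intro c _
      simp only [Function.comp_apply]
      rw [getD_tail]

theorem pyRange_nat (N : Nat) :
    PySem.List.pyRange 0 (N : Int) 1 = List.map Int.ofNat (List.range N) := by
  rw [PySem.List.pyRange_of_pos 0 (N : Int) (by norm_num)]
  by_cases hN : (0 : Int) < (N : Int)
  · rw [if_pos hN]
    have h1 : ((N : Int) - 0 + 1 - 1) / 1 = (N : Int) := by ring_nf; simp
    rw [h1, Int.toNat_natCast]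
    apply List.map_congr_left
    intro k _
    simp [Int.ofNat_eq_natCast]
  · have : N = 0 := by omega
    subst this
    simp

def joinSep (sep : List Char) : List (List Char) → List Char
  | [] => []
  | [c] => c
  | c :: rest => c ++ sep ++ joinSep sep rest

theorem intercalate_joinSep (sep : List Char) : ∀ (parts : List (List Char)),
    sep.intercalate parts = joinSep sep parts
  | [] => by simp [joinSep, List.intercalate]
  | [c] => by simp [joinSep, List.intercalate]
  | c :: d :: rest => by
    have ih := intercalate_joinSep sep (d :: rest)
    have h1 : sep.intercalate (c :: d :: rest) = c ++ sep ++ sep.intercalate (d :: rest) := by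
      simp [List.intercalate, List.intersperse]
    rw [h1, ih]
    rfl

theorem joinSep_eq_join (sep : List Char) (parts : List (List Char)) :
    PySem.Chars.join sep parts = joinSep sep parts := by
  rw [PySem.Chars.join]
  exact intercalate_joinSep sep parts

theorem joinSep_nil_eq_flatten : ∀ (parts : List (List Char)),
    joinSep [] parts = parts.flatten
  | [] => rfl
  | [c] => by simp [joinSep]
  | c :: d :: rest => by
    have ih := joinSep_nil_eq_flatten (d :: rest)
    show c ++ [] ++ joinSep [] (d :: rest) = _
    rw [ih]
    simp

theorem joinSep_eq_flatten (sep : List Char) : ∀ (cs : List (List Char)),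
    joinSep sep cs
      = ((List.range cs.length).map
          (fun k => cs.getD k [] ++ if k ≠ cs.length - 1 then sep else [])).flatten := by
  intro cs
  induction cs with
  | nil => simp [joinSep]
  | cons c rest ih =>
    cases rest with
    | nil => simp [joinSep, List.range_succ]
    | cons d ds =>
      show c ++ sep ++ joinSep sep (d :: ds) = _
      rw [ih]
      conv_rhs => rw [List.length_cons, List.range_succ_eq_map]
      rw [List.map_cons, List.flatten_cons, List.getD_cons_zero]
      rw [if_pos (by simp)]
      have hmap : List.map ((fun k => (c :: d :: ds).getD k [] ++ if k ≠ (d :: ds).length + 1 - 1 then sep else []) ∘ Nat.succ) (List.range (d :: ds).length)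
          = List.map (fun k => (d :: ds).getD k [] ++ if k ≠ (d :: ds).length - 1 then sep else []) (List.range (d :: ds).length) := by
        apply List.map_congr_left
        intro k hk
        simp only [Function.comp_apply, List.getD_cons_succ]
        congr 1
        simp only [List.length_cons]
        by_cases hk2 : k = ds.length
        · rw [if_neg (by omega), if_neg (by omega)]
        · rw [if_pos (by omega), if_pos (by omega)]
      rw [List.map_map, hmap]

theorem cols_eq (texts : List String) (lenLines : List Int)
    (hlen : texts.length ≤ lenLines.length) :
    (List.range texts.length).foldl (fun cols i =>
      let ft := formatTextP (PySem.List.pyGetD texts (i : Int) "").toList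
                  (PySem.List.pyGetD lenLines (i : Int) 0) ['\n']
      let col := ((List.range (PySem.Chars.count ft ['\n'])).foldl
          (fun (st : List (List Char) × Int) _ =>
            let e := PySem.Chars.findFrom ft ['\n'] st.2 none
            (st.1 ++ [PySem.List.slice ft (some st.2) (some e)], e + 1)) ([], 0)).1
      cols ++ [col]) []
    = (texts.zip lenLines).map (fun tw =>
      ((PySem.Chars.split? (formatTextP tw.1.toList tw.2 ['\n']) ['\n']).getD []).dropLast) := by
  simp only []
  rw [PySem.List.foldl_append_singleton_eq_map]
  simp only [List.nil_append]
  apply List.ext_getElem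
  · simp
    omega
  · intro i h1 h2
    have hi : i < texts.length := by simpa using h1
    have hi2 : i < lenLines.length := by omega
    simp only [bind_pure_comp, List.map_eq_map, List.map_map, List.getElem_map,
      List.getElem_range, List.getElem_zip, Function.comp_apply]
    rw [colA_eq]
    rw [PySem.List.pyGetD_natCast texts i "", PySem.List.pyGetD_natCast lenLines i 0]
    rw [List.getD_eq_getElem texts "" hi, List.getD_eq_getElem lenLines 0 hi2]

theorem prefix_fold (cellI : Int → List Char) (sep : List Char) (M : Int) :
    ∀ (ks : List Nat) (acc : List Char), (∀ k ∈ ks, Int.ofNat k ≠ M) →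
    (List.map Int.ofNat ks).foldl (fun acc2 j =>
        let acc3 := acc2 ++ cellI j
        if j ≠ M then acc3 ++ sep else acc3) acc
    = acc ++ (ks.map (fun k => cellI (Int.ofNat k) ++ sep)).flatten := by
  intro ks
  induction ks with
  | nil => intro acc _; simp
  | cons k t ih =>
    intro acc h
    simp only [List.map_cons, List.foldl_cons]
    rw [if_pos (h k (by simp))]
    rw [ih (acc ++ cellI (Int.ofNat k) ++ sep) (fun x hx => h x (by simp [hx]))]
    simp

theorem inner_fold_eq (cellI : Int → List Char) (sep : List Char) (L : Nat) (acc : List Char) :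
    (List.map Int.ofNat (List.range L)).foldl (fun acc2 j =>
        let acc3 := acc2 ++ cellI j
        if j ≠ (L : Int) - 1 then acc3 ++ sep else acc3) acc
    = acc ++ joinSep sep ((List.range L).map (fun k => cellI (Int.ofNat k))) := by
  cases L with
  | zero => simp [joinSep]
  | succ L =>
    rw [List.range_succ, List.map_append, List.map_append, List.foldl_append]
    rw [prefix_fold cellI sep (((L + 1 : Nat) : Int) - 1) (List.range L) acc
      (by intro k hk; simp at hk; simp [Int.ofNat_eq_natCast]; omega)]
    simp only [List.map_cons, List.map_nil, List.foldl_cons, List.foldl_nil]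
    rw [if_neg (by simp)]
    have hsnoc : ∀ (xs : List (List Char)) (x : List Char),
        joinSep sep (xs ++ [x]) = (xs.map (· ++ sep)).flatten ++ x := by
      intro xs
      induction xs with
      | nil => intro x; simp [joinSep]
      | cons y ys ihy =>
        intro x
        cases ys with
        | nil => simp [joinSep]
        | cons z zs =>
          have := ihy x
          show y ++ sep ++ joinSep sep ((z :: zs) ++ [x]) = _
          rw [this]
          simp
    rw [hsnoc ((List.range L).map (fun k => cellI (Int.ofNat k))) (cellI (Int.ofNat L))]
    simp [List.map_map, Function.comp_def]

theorem padded_getD (c : List (List Char)) (N i : Nat) (hi : i < N) :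
    (c ++ List.replicate (N - c.length) ([] : List Char)).getD i [] = c.getD i [] := by
  by_cases h : i < c.length
  · rw [List.getD_eq_getElem?_getD, List.getElem?_append_left h, ← List.getD_eq_getElem?_getD]
  · rw [List.getD_eq_getElem?_getD, List.getElem?_append_right (by omega), List.getElem?_replicate,
        List.getD_eq_getElem?_getD, List.getElem?_eq_none (show c.length ≤ i by omega)]
    by_cases h2 : i - c.length < N - c.length
    · rw [if_pos h2]; rfl
    · rw [if_neg h2]

theorem tail_eq (cols : List (List (List Char))) (lenLines : List Int) (margin : Int)
    (hlen : cols.length ≤ lenLines.length) :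
    (let maxLine : Int := cols.foldl (fun m c => if (c.length : Int) > m then (c.length : Int) else m) 0
     let padded := cols.map (fun c => padWhile c maxLine)
     (PySem.List.pyRange 0 maxLine 1).foldl (fun acc i =>
       ((PySem.List.pyRange 0 (padded.length : Int) 1).foldl (fun acc2 j =>
         let acc3 := acc2 ++ ljustP (PySem.List.pyGetD (PySem.List.pyGetD padded j []) i [])
                               (PySem.List.pyGetD lenLines j 0)
         if j ≠ (padded.length : Int) - 1 then acc3 ++ ljustP [] margin else acc3) acc)
       ++ ['\n']) [])
    = (zipLongestRows cols).foldl (fun acc row =>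
        acc ++ PySem.Chars.join (PySem.List.pyRepeat [' '] margin)
          ((row.zip lenLines).map (fun cw => ljustP cw.1 cw.2)) ++ ['\n']) [] := by
  simp only []
  set N := (cols.map (fun c => c.length)).foldl max 0 with hN
  have hmax : cols.foldl (fun (m : Int) c => if (c.length : Int) > m then (c.length : Int) else m) 0 = (N : Int) := by
    simpa using maxLine_eq cols 0
  rw [hmax]
  have hle : ∀ c ∈ cols, c.length ≤ N := by
    intro c hc
    have h2 := (PySem.List.le_foldl_max_nat cols (fun c => c.length) 0).2 c hc
    rw [hN, List.foldl_map]
    exact h2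
  have hpad : cols.map (fun c => padWhile c (N : Int)) = cols.map (fun c => c ++ List.replicate (N - c.length) []) := by
    apply List.map_congr_left
    intro c hc
    have hk := padWhile_eq c (N - c.length)
    rw [show c.length + (N - c.length) = N from by have := hle c hc; omega] at hk
    exact hk
  rw [hpad]
  set padded := cols.map (fun c => c ++ List.replicate (N - c.length) ([] : List Char)) with hpadded
  have hplen : padded.length = cols.length := by rw [hpadded]; simp
  rw [hplen]
  rw [pyRange_nat N, pyRange_nat cols.length]
  rw [zipLongestRows_eq N cols hN.symm]
  rw [List.foldl_map, List.foldl_map]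
  apply PySem.List.foldl_congr_mem
  intro acc i hi
  have hiN : i < N := List.mem_range.mp hi
  rw [inner_fold_eq (fun j => ljustP (PySem.List.pyGetD (PySem.List.pyGetD padded j []) (Int.ofNat i) [])
        (PySem.List.pyGetD lenLines j 0)) (ljustP [] margin) cols.length acc]
  rw [joinSep_eq_join]
  have hsep : PySem.List.pyRepeat [' '] margin = ljustP [] margin := by
    simp [ljustP, PySem.List.pyRepeat_singleton]
  rw [hsep]
  have hcells : (List.range cols.length).map (fun k =>
        ljustP (PySem.List.pyGetD (PySem.List.pyGetD padded (Int.ofNat k) []) (Int.ofNat i) [])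
          (PySem.List.pyGetD lenLines (Int.ofNat k) 0))
      = ((cols.map (fun c => c.getD i [])).zip lenLines).map (fun cw => ljustP cw.1 cw.2) := by
    apply List.ext_getElem
    · simp
      omega
    · intro k hk1 hk2
      have hkL : k < cols.length := by simpa using hk1
      have hkW : k < lenLines.length := by omega
      simp only [List.getElem_map, List.getElem_range, List.getElem_zip]
      simp only [Int.ofNat_eq_natCast, PySem.List.pyGetD_natCast]
      have hpk : padded.getD k [] = cols[k] ++ List.replicate (N - cols[k].length) ([] : List Char) := by
        rw [hpadded, List.getD_eq_getElem _ _ (by simpa using hkL), List.getElem_map]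
      rw [hpk, padded_getD (cols[k]) N i hiN, List.getD_eq_getElem lenLines 0 hkW]
  rw [hcells]

-- ===== B-side canonical form =====

def pvCell (cols : List (List (List Char))) (lenLines : List Int) (rep : List Char)
    (n k i : Nat) : List Char :=
  ljustP ((cols.getD k []).getD i []) (lenLines.getD k 0) ++ (if k ≠ n - 1 then rep else [])

def pvRow (cols : List (List (List Char))) (lenLines : List Int) (rep : List Char)
    (n j i : Nat) : List Char :=
  ((List.range j).map (fun k => pvCell cols lenLines rep n k i)).flatten

def pvBlank (lenLines : List Int) (rep : List Char) (n j : Nat) : List Char :=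
  ((List.range j).map (fun k =>
    ljustP [] (lenLines.getD k 0) ++ (if k ≠ n - 1 then rep else []))).flatten

def pvM (cols : List (List (List Char))) (j : Nat) : Nat :=
  ((cols.take j).map List.length).foldl max 0

theorem pvLen_le_M (cols : List (List (List Char))) (j k : Nat) (hk : k < j) (hj : j ≤ cols.length) :
    (cols.getD k []).length ≤ pvM cols j := by
  have hk' : k < (cols.take j).length := by simp; omega
  have hkc : k < cols.length := by omega
  have hmem : (cols.take j)[k] ∈ cols.take j := List.getElem_mem hk'
  have := (PySem.List.le_foldl_max_nat ((cols.take j).map List.length) id 0).2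
      ((cols.take j)[k]).length (List.mem_map.mpr ⟨_, hmem, rfl⟩)
  simp only [id] at this
  rw [List.getElem_take] at this
  rw [List.getD_eq_getElem cols [] hkc]
  unfold pvM
  exact this

theorem pvM_succ (cols : List (List (List Char))) (j : Nat) (hj : j < cols.length) :
    pvM cols (j + 1) = max (pvM cols j) (cols.getD j []).length := by
  unfold pvM
  rw [List.take_succ, List.getElem?_eq_getElem hj]
  simp only [Option.toList_some, List.map_append, List.map_cons, List.map_nil,
    List.foldl_append, List.foldl_cons, List.foldl_nil]
  rw [List.getD_eq_getElem cols [] hj]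

theorem pvRow_blank (cols : List (List (List Char))) (lenLines : List Int) (rep : List Char)
    (n j i : Nat) (hj : j ≤ cols.length) (hi : pvM cols j ≤ i) :
    pvRow cols lenLines rep n j i = pvBlank lenLines rep n j := by
  unfold pvRow pvBlank
  apply congrArg List.flatten
  apply List.map_congr_left
  intro k hk
  have hk' : k < j := List.mem_range.mp hk
  have hlen := pvLen_le_M cols j k hk' hj
  unfold pvCell
  rw [List.getD_eq_default _ _ (by omega)]

theorem pvRow_succ (cols : List (List (List Char))) (lenLines : List Int) (rep : List Char)
    (n j i : Nat) :
    pvRow cols lenLines rep n (j + 1) i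
      = pvRow cols lenLines rep n j i ++ pvCell cols lenLines rep n j i := by
  unfold pvRow
  rw [List.range_succ]
  simp

theorem pvBlank_succ (lenLines : List Int) (rep : List Char) (n j : Nat) :
    pvBlank lenLines rep n (j + 1)
      = pvBlank lenLines rep n j
        ++ (ljustP [] (lenLines.getD j 0) ++ (if j ≠ n - 1 then rep else [])) := by
  unfold pvBlank
  rw [List.range_succ]
  simp

theorem map_enumerate_zero {β : Type} (xs : List (List Char)) (g : Int × List Char → β) :
    (PySem.List.enumerate xs 0).map g
      = (List.range xs.length).map (fun (i : Nat) => g ((i : Int), xs.getD i [])) := by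
  apply List.ext_getElem
  · simp [PySem.List.length_enumerate]
  · intro i h1 h2
    have hi : i < xs.length := by
      simpa [PySem.List.length_enumerate] using h1
    simp only [List.getElem_map, List.getElem_range]
    rw [PySem.List.getElem_enumerate xs 0 i (by simpa [PySem.List.length_enumerate] using hi)]
    rw [List.getD_eq_getElem xs [] hi]
    norm_num

theorem B_loop_eq (texts : List String) (lenLines : List Int)
    (hlen : texts.length ≤ lenLines.length) (rep : List Char) :
    ∀ (j : Nat), j ≤ texts.length →
    (List.range j).foldl (fun (st : List (List Char) × List Char) j =>
      let lines := ((PySem.Chars.split? (formatTextP (texts.getD j "").toList (lenLines.getD j 0) ['\n'])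
                      ['\n']).getD []).dropLast
      let rows0 := st.1 ++ List.replicate (lines.length - st.1.length) st.2
      let sep := if j ≠ texts.length - 1 then rep else []
      let rows := (PySem.List.enumerate rows0 0).map (fun p =>
        p.2 ++ ljustP (if p.1 < (lines.length : Int) then PySem.List.pyGetD lines p.1 [] else [])
                 (lenLines.getD j 0) ++ sep)
      (rows, st.2 ++ ljustP [] (lenLines.getD j 0) ++ sep)) ([], [])
    = (let cols := (texts.zip lenLines).map (fun tw =>
        ((PySem.Chars.split? (formatTextP tw.1.toList tw.2 ['\n']) ['\n']).getD []).dropLast)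
       ((List.range (pvM cols j)).map (fun i => pvRow cols lenLines rep texts.length j i),
        pvBlank lenLines rep texts.length j)) := by
  intro j
  induction j with
  | zero =>
    intro _
    simp [pvM, pvBlank]
  | succ j ih =>
    intro hj1
    have hj : j < texts.length := by omega
    rw [List.range_succ, List.foldl_append, ih (by omega)]
    simp only [List.foldl_cons, List.foldl_nil]
    set cols := (texts.zip lenLines).map (fun tw =>
        ((PySem.Chars.split? (formatTextP tw.1.toList tw.2 ['\n']) ['\n']).getD []).dropLast) with hcols
    have hcl : cols.length = texts.length := by
      rw [hcols]; simp; omega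
    have hjc : j < cols.length := by omega
    -- the lines computed at step j are column j
    have hlines :
        ((PySem.Chars.split? (formatTextP (texts.getD j "").toList (lenLines.getD j 0) ['\n'])
            ['\n']).getD []).dropLast = cols.getD j [] := by
      rw [hcols, List.getD_eq_getElem _ [] (by rw [← hcols]; exact hjc), List.getElem_map,
        List.getElem_zip]
      rw [List.getD_eq_getElem texts "" hj, List.getD_eq_getElem lenLines 0 (by omega)]
    simp only [hlines]
    set L := (cols.getD j []).length with hL
    set M := pvM cols j with hM
    have hM' : pvM cols (j + 1) = max M L := by
      rw [pvM_succ cols j hjc]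
    -- rows0 equals the canonical prefix rows up to max M L
    have hrows0 :
        ((List.range M).map (fun i => pvRow cols lenLines rep texts.length j i))
          ++ List.replicate (L - M) (pvBlank lenLines rep texts.length j)
        = (List.range (max M L)).map (fun i => pvRow cols lenLines rep texts.length j i) := by
      apply List.ext_getElem
      · simp
        omega
      · intro i h1 h2
        have hiM : i < max M L := by simpa using h2
        by_cases hi : i < M
        · rw [List.getElem_append_left (by simpa using hi)]
          simp
        · rw [List.getElem_append_right (by simpa using hi)]
          rw [List.getElem_replicate, List.getElem_map, List.getElem_range]
          rw [pvRow_blank cols lenLines rep texts.length j i (by omega) (by omega)]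
    simp only [List.length_map, List.length_range] at hrows0 ⊢
    rw [hrows0]
    refine Prod.ext ?_ ?_
    · -- rows after this step
      rw [map_enumerate_zero]
      rw [hM']
      simp only [List.length_map, List.length_range]
      apply List.map_congr_left
      intro i hi
      have hiM : i < max M L := List.mem_range.mp hi
      rw [List.getD_eq_getElem _ [] (by simpa using hiM), List.getElem_map, List.getElem_range]
      rw [pvRow_succ]
      have hcellbody :
          ljustP (if ((i : Nat) : Int) < ((cols.getD j []).length : Int)
                    then PySem.List.pyGetD (cols.getD j []) ((i : Nat) : Int) []
                    else []) (lenLines.getD j 0)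
            ++ (if j ≠ texts.length - 1 then rep else [])
          = pvCell cols lenLines rep texts.length j i := by
        unfold pvCell
        congr 1
        by_cases hiL : i < (cols.getD j []).length
        · rw [if_pos (by exact_mod_cast hiL)]
          rw [PySem.List.pyGetD_natCast]
        · have hge : (cols.getD j []).length ≤ i := by omega
          rw [if_neg (by exact_mod_cast hiL), List.getD_eq_default _ _ hge]
      rw [← hcellbody]
      simp only [List.append_assoc, PySem.List.pyGetD_natCast]
      rw [hL]
    · rw [pvBlank_succ]
      simp [List.append_assoc]

-- ===== VERDICT (by name: the statement is the Claim_ definition above) =====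
theorem getFormatedBodyColumns_spec : Claim_equal_getFormatedBodyColumns := by
  intro texts lenLines margin _hdom hpre
  obtain ⟨hlen, _hw⟩ := hpre
  unfold Spec_getFormatedBodyColumns
  unfold getFormatedBodyColumns getFormatedBodyColumns_alt
  simp only []
  rw [cols_eq texts lenLines hlen]
  set cols := (texts.zip lenLines).map (fun tw =>
      ((PySem.Chars.split? (formatTextP tw.1.toList tw.2 ['\n']) ['\n']).getD []).dropLast) with hcols
  have hcl : cols.length = texts.length := by rw [hcols]; simp; omega
  set rep := PySem.List.pyRepeat [' '] margin with hrep
  -- A side: transpose description, then flatten of canonical rows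
  rw [tail_eq cols lenLines margin (by omega)]
  set N := (cols.map (fun c => c.length)).foldl max 0 with hN
  rw [zipLongestRows_eq N cols hN.symm]
  -- B side: loop invariant at j = texts.length
  rw [B_loop_eq texts lenLines hlen rep texts.length (le_refl _)]
  simp only [← hcols]
  have hMn : pvM cols texts.length = N := by
    unfold pvM
    rw [← hcl, List.take_length]
  rw [hMn]
  apply congrArg String.ofList
  rw [joinSep_eq_join, joinSep_nil_eq_flatten]
  rw [List.foldl_map]
  have hfold :
      (List.range N).foldl (fun acc i =>
        acc ++ PySem.Chars.join rep
          (((cols.map (fun c => c.getD i [])).zip lenLines).map (fun cw => ljustP cw.1 cw.2))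
          ++ ['\n']) []
      = ((List.range N).map (fun i =>
          PySem.Chars.join rep
            (((cols.map (fun c => c.getD i [])).zip lenLines).map (fun cw => ljustP cw.1 cw.2))
            ++ ['\n'])).flatten := by
    simp only [List.append_assoc]
    rw [PySem.List.foldl_append_eq_flatMap]
    simp [List.flatMap_def]
  rw [hfold]
  rw [List.map_map]
  apply congrArg List.flatten
  apply List.map_congr_left
  intro i _
  simp only [Function.comp_apply]
  congr 1
  -- the joined row equals the canonical row
  rw [joinSep_eq_join, joinSep_eq_flatten]
  have hcslen : (((cols.map (fun c => c.getD i [])).zip lenLines)).length = texts.length := by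
    simp
    omega
  rw [List.length_map, hcslen]
  unfold pvRow
  apply congrArg List.flatten
  apply List.map_congr_left
  intro k hk
  have hk' : k < texts.length := List.mem_range.mp hk
  unfold pvCell
  congr 1
  rw [List.getD_eq_getElem _ [] (by rw [List.length_map, hcslen]; exact hk')]
  rw [List.getElem_map, List.getElem_zip, List.getElem_map]
  rw [List.getD_eq_getElem cols [] (by omega), List.getD_eq_getElem lenLines 0 (by omega)]
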